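-- pv_equiv track=rewrite | github.com/manavdhamecha77/IndicWG2025 | XLM-ROBERTA/predict_eval.py | reconstruct_sentence
-- ===== SOURCE A (Python) =====
-- from typing import List, Tuple
--
-- def reconstruct_sentence(words: List[str], word_label_ids: List[int], id2label: dict) -> str:
--     """Rebuild grouped sentence using BIO labels (B/I/O) and '__' joiner."""
--     labs = [id2label.get(int(x), 'O') for x in word_label_ids]
--     out, i = [], 0
--     while i < len(words):
--         lab = labs[i] if i < len(labs) else 'O'
--         if lab == 'B':
--             group = [words[i]]
--             i += 1
--             while i < len(words):
--                 lab_i = labs[i] if i < len(labs) else 'O'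
--                 if lab_i == 'I':
--                     group.append(words[i])
--                     i += 1
--                 else:
--                     break
--             out.append('__'.join(group))
--         else:
--             out.append(words[i])
--             i += 1
--     return ' '.join(out)
-- ===== SOURCE B (Python) =====
-- from typing import List
--
-- def reconstruct_sentence(words: List[str], word_label_ids: List[int], id2label: dict) -> str:
--     """Rebuild grouped sentence using BIO labels, as one flat pass emitting a
--     separator (' ' or '__') before each word instead of building groups."""
--     labs = [id2label.get(int(x), 'O') for x in word_label_ids]
--     pieces = []
--     attached = False  # True iff the previous word can be continued by an 'I'
--     for i, w in enumerate(words):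
--         lab = labs[i] if i < len(labs) else 'O'
--         if i > 0:
--             pieces.append('__' if (lab == 'I' and attached) else ' ')
--         pieces.append(w)
--         attached = lab == 'B' or (lab == 'I' and attached)
--     return ''.join(pieces)
-- ===== Notes on version B (the rewrite author's own statement) =====
-- stated objective: simpler
-- what changed: Replaces A's nested while loops (index bookkeeping, per-'B' group list, '__'.join per group, final ' '.join) with a single flat for-pass over enumerate(words) that keeps one 'attached' flag and emits each word prefixed by a computed separator (' ' or '__'), concatenated once at the end.
import Mathlib
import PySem

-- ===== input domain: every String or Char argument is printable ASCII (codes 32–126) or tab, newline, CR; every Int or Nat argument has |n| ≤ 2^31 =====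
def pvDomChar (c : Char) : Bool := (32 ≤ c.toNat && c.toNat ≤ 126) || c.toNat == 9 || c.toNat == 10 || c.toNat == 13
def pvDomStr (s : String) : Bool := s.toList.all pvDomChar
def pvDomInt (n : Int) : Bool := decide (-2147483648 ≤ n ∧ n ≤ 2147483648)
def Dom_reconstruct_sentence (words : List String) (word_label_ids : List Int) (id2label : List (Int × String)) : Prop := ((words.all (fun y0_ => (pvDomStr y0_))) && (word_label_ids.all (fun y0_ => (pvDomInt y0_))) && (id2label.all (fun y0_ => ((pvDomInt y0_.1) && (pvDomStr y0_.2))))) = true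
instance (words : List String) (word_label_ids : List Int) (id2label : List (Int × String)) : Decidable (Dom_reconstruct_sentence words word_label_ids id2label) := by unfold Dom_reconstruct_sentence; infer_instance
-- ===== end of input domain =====

-- B replaces A's nested while loops (building a group list per 'B' and '__'-joining
-- it) by one flat pass that emits a separator (' ' or '__') before every word; same
-- return value, objective: simpler decomposition.

-- ===== PORT A =====
-- labs[i] if i < len(labs) else 'O'
def pvLabA (labs : List String) (i : Nat) : String :=
  if i < labs.length then labs.getD i "O" else "O"

-- the inner 'while i < len(words): ... if lab_i == "I" ... else break' loop of A
def pvAInner (words labs : List String) (i : Nat) (group : List String) : List String × Nat :=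
  if i < words.length then
    if pvLabA labs i == "I" then
      pvAInner words labs (i + 1) (group ++ [words.getD i ""])
    else (group, i)
  else (group, i)
termination_by words.length - i

-- needed only so that pvAOuter's recursion is seen to terminate
theorem pvAInner_snd_ge (words labs : List String) (i : Nat) (g : List String) :
    i ≤ (pvAInner words labs i g).2 := by
  rw [pvAInner]
  split
  · split
    · exact Nat.le_trans (Nat.le_succ i) (pvAInner_snd_ge words labs (i + 1) _)
    · exact Nat.le_refl i
  · exact Nat.le_refl i
termination_by words.length - i

-- the outer 'while i < len(words)' loop of A
def pvAOuter (words labs : List String) (i : Nat) (out : List String) : List String :=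
  if i < words.length then
    if pvLabA labs i == "B" then
      let r := pvAInner words labs (i + 1) [words.getD i ""]
      pvAOuter words labs r.2 (out ++ [PySem.Str.join "__" r.1])
    else
      pvAOuter words labs (i + 1) (out ++ [words.getD i ""])
  else out
termination_by words.length - i
decreasing_by
  · have := pvAInner_snd_ge words labs (i + 1) [words.getD i ""]
    omega
  · omega

def reconstruct_sentence (words : List String) (word_label_ids : List Int) (id2label : List (Int × String)) : String :=
  let labs := word_label_ids.map (fun x => PySem.Dict.getD (PySem.Dict.mk id2label) x "O")
  PySem.Str.join " " (pvAOuter words labs 0 [])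

-- ===== PORT B =====
-- one iteration of B's 'for i, w in enumerate(words)' loop; state = (pieces, attached)
def pvBStep (labs : List String) (st : List String × Bool) (p : Int × String) : List String × Bool :=
  let lab := if p.1 < (labs.length : Int) then labs.getD p.1.toNat "O" else "O"
  let pieces := if 0 < p.1 then st.1 ++ [if lab == "I" && st.2 then "__" else " "] else st.1
  (pieces ++ [p.2], lab == "B" || (lab == "I" && st.2))

def reconstruct_sentence_alt (words : List String) (word_label_ids : List Int) (id2label : List (Int × String)) : String :=
  let labs := word_label_ids.map (fun x => PySem.Dict.getD (PySem.Dict.mk id2label) x "O")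
  let st := (PySem.List.enumerate words).foldl (pvBStep labs) ([], false)
  PySem.Str.join "" st.1

-- ===== PRECONDITION & SPEC =====
def Spec_reconstruct_sentence (words : List String) (word_label_ids : List Int) (id2label : List (Int × String)) (out : String) : Prop := out = reconstruct_sentence_alt words word_label_ids id2label
instance (words : List String) (word_label_ids : List Int) (id2label : List (Int × String)) (out : String) : Decidable (Spec_reconstruct_sentence words word_label_ids id2label out) := by unfold Spec_reconstruct_sentence; infer_instance

-- ===== CLAIM (what is proved, stated in full; the proofs are below) =====
def Claim_equal_reconstruct_sentence : Prop := ∀ (words : List String) (word_label_ids : List Int) (id2label : List (Int × String)), Dom_reconstruct_sentence words word_label_ids id2label → Spec_reconstruct_sentence words word_label_ids id2label (reconstruct_sentence words word_label_ids id2label)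

-- ===== LEMMAS AND PROOFS =====

-- string-join helpers
theorem pvJoin0_nil : PySem.Str.join "" [] = "" := by
  apply String.ext; simp [PySem.Str.toList_join, PySem.Chars.join_nil]

theorem pvJoin_singleton (s x : String) : PySem.Str.join s [x] = x := by
  apply String.ext; simp [PySem.Str.toList_join, PySem.Chars.join_singleton]

theorem pvJoin_cons_ne (s x : String) (ys : List String) (h : ys ≠ []) :
    PySem.Str.join s (x :: ys) = x ++ s ++ PySem.Str.join s ys := by
  cases ys with
  | nil => exact absurd rfl h
  | cons y t =>
    apply String.ext
    simp [PySem.Str.toList_join, PySem.Chars.join_cons_cons, String.toList_append]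

theorem pvJoin0_cons (x : String) (ys : List String) :
    PySem.Str.join "" (x :: ys) = x ++ PySem.Str.join "" ys := by
  cases ys with
  | nil => simp [pvJoin_singleton, pvJoin0_nil]
  | cons y t =>
    rw [pvJoin_cons_ne "" x (y :: t) (by simp)]
    apply String.ext
    simp [String.toList_append]

theorem pvJoin0_append (xs ys : List String) :
    PySem.Str.join "" (xs ++ ys) = PySem.Str.join "" xs ++ PySem.Str.join "" ys := by
  induction xs with
  | nil =>
    apply String.ext
    simp [pvJoin0_nil, String.toList_append]
  | cons x t ih =>
    simp only [List.cons_append, pvJoin0_cons, ih, String.append_assoc]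

theorem pvJoin_sep_map (s x : String) (ys : List String) :
    PySem.Str.join s (x :: ys) = x ++ PySem.Str.join "" (ys.map (fun w => s ++ w)) := by
  induction ys generalizing x with
  | nil =>
    apply String.ext
    simp [pvJoin_singleton, pvJoin0_nil, String.toList_append]
  | cons y t ih =>
    rw [pvJoin_cons_ne s x (y :: t) (by simp)]
    simp only [List.map_cons, pvJoin0_cons, ih y, String.append_assoc]

-- pvAInner accumulates on the right of 'group'; the stop index ignores it
theorem pvAInner_append (words labs : List String) (i : Nat) (g : List String) :
    pvAInner words labs i g
      = (g ++ (pvAInner words labs i []).1, (pvAInner words labs i []).2) := by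
  conv_lhs => rw [pvAInner]
  conv_rhs => rw [pvAInner]
  by_cases h1 : i < words.length
  · by_cases h2 : (pvLabA labs i == "I") = true
    · simp only [h1, if_true, h2, List.nil_append]
      rw [pvAInner_append words labs (i + 1) (g ++ [words.getD i ""]),
          pvAInner_append words labs (i + 1) [words.getD i ""]]
      simp
    · simp [h1, h2]
  · simp [h1]
termination_by words.length - i

-- pvAOuter accumulates on the right of 'out'
theorem pvAOuter_append (words labs : List String) (i : Nat) (out : List String) :
    pvAOuter words labs i out = out ++ pvAOuter words labs i [] := by
  conv_lhs => rw [pvAOuter]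
  conv_rhs => rw [pvAOuter]
  by_cases h1 : i < words.length
  · by_cases h2 : (pvLabA labs i == "B") = true
    · simp only [h1, if_true, h2, List.nil_append]
      rw [pvAOuter_append words labs _ (out ++ _), pvAOuter_append words labs _ [_]]
      simp
    · simp only [h1, if_true, h2, Bool.false_eq_true, if_false, List.nil_append]
      rw [pvAOuter_append words labs (i + 1) (out ++ _),
          pvAOuter_append words labs (i + 1) [_]]
      simp
  · simp [h1]
termination_by words.length - i
decreasing_by
  · have := pvAInner_snd_ge words labs (i + 1) [words.getD i ""]; omega
  · have := pvAInner_snd_ge words labs (i + 1) [words.getD i ""]; omega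
  · omega
  · omega

theorem pvAOuter_nil (words labs : List String) (i : Nat) (h : ¬ i < words.length) :
    pvAOuter words labs i [] = [] := by
  rw [pvAOuter]; simp [h]

theorem pvAOuter_ne_nil (words labs : List String) (i : Nat) (h : i < words.length) :
    pvAOuter words labs i [] ≠ [] := by
  rw [pvAOuter]
  simp only [h, if_true]
  split
  · rw [pvAOuter_append]; simp
  · rw [pvAOuter_append]; simp

-- join " " of A's token list, split at the first token
theorem pvJoinSp_outer (words labs : List String) (j : Nat) (t : String) :
    PySem.Str.join " " (t :: pvAOuter words labs j [])
      = t ++ (if j < words.length then " " else "")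
          ++ PySem.Str.join " " (pvAOuter words labs j []) := by
  by_cases h : j < words.length
  · rw [pvJoin_cons_ne " " t _ (pvAOuter_ne_nil words labs j h)]
    simp [h]
  · rw [pvAOuter_nil words labs j h, pvJoin_singleton]
    apply String.ext
    simp [h, pvJoin0_nil, String.toList_append, PySem.Str.toList_join, PySem.Chars.join_nil]

-- the B-step at index (i : Nat), evaluated
theorem pvBStep_nat (labs : List String) (st : List String × Bool) (i : Nat) (w : String) :
    pvBStep labs st ((i : Int), w)
      = ((if 0 < i then st.1 ++ [if pvLabA labs i == "I" && st.2 then "__" else " "] else st.1)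
           ++ [w],
         pvLabA labs i == "B" || (pvLabA labs i == "I" && st.2)) := by
  simp only [pvBStep, pvLabA, Int.toNat_natCast, Nat.cast_lt, Int.natCast_pos]
  rfl

-- MAIN LEMMA: one pass of B from position i equals A's remaining grouped output.
-- φ = false : i is an outer-loop position of A (invariant: attached → label ≠ 'I');
-- φ = true  : i is inside A's inner 'I' run (attached = true, i ≥ 1).
theorem pvLM (words labs : List String) (φ : Bool) (i : Nat) (a : Bool) (pcs : List String)
    (hφ : φ = true → a = true ∧ 0 < i)
    (hinv : φ = false → a = true → (pvLabA labs i == "I") = false) :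
    PySem.Str.join "" (((PySem.List.enumerate (words.drop i) (i : Int)).foldl
        (pvBStep labs) (pcs, a)).1)
    = PySem.Str.join "" pcs ++
      (if φ then
        PySem.Str.join "" (((pvAInner words labs i []).1).map (fun w => "__" ++ w)) ++
        (if (pvAInner words labs i []).2 < words.length then " " else "") ++
        PySem.Str.join " " (pvAOuter words labs (pvAInner words labs i []).2 [])
      else
        (if i = 0 ∨ words.length ≤ i then "" else " ") ++
        PySem.Str.join " " (pvAOuter words labs i [])) := by
  by_cases hn : i < words.length
  · -- there is a word at position i
    rw [List.drop_eq_getElem_cons hn, PySem.List.enumerate_cons, List.foldl_cons]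
    have hgd : words[i] = words.getD i "" := (List.getD_eq_getElem words "" hn).symm
    rw [hgd, pvBStep_nat]
    by_cases hφt : φ = true
    · obtain ⟨ha, hipos⟩ := hφ hφt
      subst ha hφt
      by_cases hI : (pvLabA labs i == "I") = true
      · -- inside the run, an 'I': emit '__', stay attached
        simp only [hI, Bool.and_true, Bool.or_true, if_pos hipos]
        have hrec := pvLM words labs true (i + 1) true
          ((pcs ++ [if (true : Bool) = true then "__" else " "]) ++ [words.getD i ""])
          (by intro _; exact ⟨rfl, Nat.succ_pos i⟩) (by intro h; cases h)
        simp only [if_pos rfl] at hrec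
        have hpc : ((i : Int) + 1) = ((i + 1 : Nat) : Int) := by push_cast; ring
        rw [hpc, hrec]
        -- A side: pvAInner i [] = words[i] :: run(i+1)
        have hA : pvAInner words labs i []
            = (words.getD i "" :: (pvAInner words labs (i + 1) []).1,
               (pvAInner words labs (i + 1) []).2) := by
          rw [pvAInner, if_pos hn, if_pos hI]
          rw [pvAInner_append words labs (i + 1) ([] ++ [words.getD i ""])]
          simp
        rw [hA]
        simp only [List.map_cons, pvJoin0_cons, pvJoin0_append, pvJoin_singleton,
          String.append_assoc, if_true]
      · -- inside-run position whose label is not 'I': it is an outer position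
        have hA : pvAInner words labs i [] = ([], i) := by
          rw [pvAInner, if_pos hn]
          simp [Bool.eq_false_iff.mpr (fun h => hI h), hI]
        have hrec := pvLM words labs false i true pcs
          (by intro h; cases h) (by intro _ _; exact Bool.eq_false_iff.mpr (fun h => hI h))
        -- redo the already-consumed step on the recursive form
        rw [List.drop_eq_getElem_cons hn, PySem.List.enumerate_cons, List.foldl_cons,
            hgd, pvBStep_nat] at hrec
        rw [hrec, hA]
        have hor : ¬ (i = 0 ∨ words.length ≤ i) := by omega
        simp only [Bool.false_eq_true, if_false, if_true, List.map_nil, pvJoin0_nil,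
          if_neg hor, if_pos hn]
        apply String.ext
        simp [String.toList_append, PySem.Str.toList_join]
    · -- outer position
      have hφf : φ = false := by revert hφt; cases φ <;> simp
      subst hφf
      simp only [if_neg (by simp : ¬ (false : Bool) = true)]
      by_cases hB : (pvLabA labs i == "B") = true
      · -- a 'B': start a group
        have hne : (pvLabA labs i == "I") = false := by
          have := eq_of_beq hB; simp [this]
        simp only [hne, Bool.false_and, Bool.and_eq_false_iff, hB, Bool.true_or,
          Bool.false_eq_true, if_false]
        have hrec := pvLM words labs true (i + 1) true
          ((if 0 < i then pcs ++ [" "] else pcs) ++ [words.getD i ""])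
          (by intro _; exact ⟨rfl, Nat.succ_pos i⟩) (by intro h; cases h)
        simp only [if_pos rfl] at hrec
        have hpc : ((i : Int) + 1) = ((i + 1 : Nat) : Int) := by push_cast; ring
        rw [hpc]
        rw [hrec]
        -- A side
        set r2 := (pvAInner words labs (i + 1) []).2 with hr2
        set run := (pvAInner words labs (i + 1) []).1 with hrun
        have hA : pvAOuter words labs i []
            = [PySem.Str.join "__" (words.getD i "" :: run)] ++ pvAOuter words labs r2 [] := by
          rw [pvAOuter, if_pos hn, if_pos hB,
              pvAInner_append words labs (i + 1) [words.getD i ""]]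
          simp only [List.cons_append, List.nil_append]
          rw [pvAOuter_append, ← hrun, ← hr2]
          simp
        rw [hA, List.singleton_append, pvJoinSp_outer, pvJoin_sep_map]
        rw [pvJoin0_append]
        by_cases hz : 0 < i
        · have : ¬ (i = 0 ∨ words.length ≤ i) := by omega
          simp only [if_pos hz, if_neg this, pvJoin0_append, pvJoin_singleton,
            String.append_assoc, if_true]
        · have hi0 : i = 0 := by omega
          simp only [if_neg hz, hi0, true_or, if_pos (Or.inl rfl), if_true]
          apply String.ext
          simp [String.toList_append, String.append_assoc]
      · -- not a 'B': emit the word alone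
        have hcond : (pvLabA labs i == "I" && a) = false := by
          cases ha : a
          · simp
          · simp [hinv rfl ha]
        simp only [hcond, Bool.false_eq_true, if_false, hB, Bool.false_or]
        have hrec := pvLM words labs false (i + 1) false
          ((if 0 < i then pcs ++ [" "] else pcs) ++ [words.getD i ""])
          (by intro h; cases h) (by intro _ h; cases h)
        have hpc : ((i : Int) + 1) = ((i + 1 : Nat) : Int) := by push_cast; ring
        rw [hpc, hrec]
        have hA : pvAOuter words labs i [] = [words.getD i ""] ++ pvAOuter words labs (i + 1) [] := by
          rw [pvAOuter, if_pos hn, if_neg (by simp [hB]), pvAOuter_append]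
          simp
        rw [hA, List.singleton_append, pvJoinSp_outer]
        have hsep : (if i + 1 = 0 ∨ words.length ≤ i + 1 then ("" : String) else " ")
            = (if i + 1 < words.length then (" " : String) else "") := by
          by_cases h : i + 1 < words.length
          · have : ¬ (i + 1 = 0 ∨ words.length ≤ i + 1) := by omega
            simp [h, this]
          · have : i + 1 = 0 ∨ words.length ≤ i + 1 := by omega
            simp [h, this]
        rw [hsep]
        by_cases hz : 0 < i
        · have : ¬ (i = 0 ∨ words.length ≤ i) := by omega
          simp only [if_pos hz, if_neg this, pvJoin0_append, pvJoin0_cons, pvJoin_singleton,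
            pvJoin0_nil, String.append_assoc, Bool.false_eq_true, if_false]
        · have hi0 : i = 0 := by omega
          simp only [if_neg hz, hi0, true_or, if_pos (Or.inl rfl), pvJoin0_append,
            pvJoin_singleton, String.append_assoc, Bool.false_eq_true, if_false]
          apply String.ext
          simp [String.toList_append]
  · -- no words left
    have hd : words.drop i = [] := List.drop_eq_nil_of_le (by omega)
    rw [hd]
    simp only [PySem.List.enumerate_nil, List.foldl_nil]
    have hA : pvAInner words labs i [] = ([], i) := by rw [pvAInner]; simp [hn]
    have hO := pvAOuter_nil words labs i hn
    cases φ
    · have : i = 0 ∨ words.length ≤ i := by omega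
      simp only [Bool.false_eq_true, if_false, this, if_pos this, hO]
      apply String.ext
      simp [PySem.Str.toList_join, PySem.Chars.join_nil, String.toList_append]
    · simp only [if_pos rfl, hA, hO]
      simp only [List.map_nil, pvJoin0_nil, if_neg hn]
      apply String.ext
      simp [PySem.Str.toList_join, PySem.Chars.join_nil, String.toList_append]
termination_by (words.length - i, if φ then 1 else 0)
decreasing_by
  all_goals first
    | exact Prod.Lex.left _ _ (by omega)
    | exact Prod.Lex.right _ (by omega)
    | exact Prod.Lex.right _ (by cases φ <;> simp_all)

-- ===== VERDICT (by name: the statement is the Claim_ definition above) =====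
theorem reconstruct_sentence_spec : Claim_equal_reconstruct_sentence := by
  intro words word_label_ids id2label _
  unfold Spec_reconstruct_sentence reconstruct_sentence reconstruct_sentence_alt
  have h := pvLM words (word_label_ids.map (fun x => PySem.Dict.getD (PySem.Dict.mk id2label) x "O"))
    false 0 false [] (by intro h; cases h) (by intro _ h; cases h)
  simp only [List.drop_zero, Nat.cast_zero] at h
  rw [h]
  simp only [le_zero_iff, true_or, if_pos (Or.inl rfl), pvJoin0_nil]
  apply String.ext
  simp [String.toList_append]
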